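-- pv_equiv track=rewrite | github.com/chinmaymufasa/mufasa | cfgsplittest.py | sublist_analyze
-- ===== SOURCE A (Python) =====
-- def sublist_analyze(list):
--     newlist = []
--     for idx, string in enumerate(list):
--         text = list[idx]
--         prev = 0
--         for detected, val in enumerate(text):
--             if text[detected] == ' ':
--                 newlist.append(text[prev:detected])
--                 prev = detected
--     return newlist
-- ===== SOURCE B (Python) =====
-- def sublist_analyze(list):
--     newlist = []
--     for text in list:
--         positions = [i for i, c in enumerate(text) if c == ' ']
--         starts = [0] + positions[:-1]
--         newlist.extend(text[s:e] for s, e in zip(starts, positions))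
--     return newlist
-- ===== Notes on version B (the rewrite author's own statement) =====
-- stated objective: alternative
-- what changed: B first collects all space positions per string, then builds the segments by zipping each space position with the previous one (starting at 0), instead of A's stateful character-by-character scan with a running 'prev' accumulator.
import Mathlib
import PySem

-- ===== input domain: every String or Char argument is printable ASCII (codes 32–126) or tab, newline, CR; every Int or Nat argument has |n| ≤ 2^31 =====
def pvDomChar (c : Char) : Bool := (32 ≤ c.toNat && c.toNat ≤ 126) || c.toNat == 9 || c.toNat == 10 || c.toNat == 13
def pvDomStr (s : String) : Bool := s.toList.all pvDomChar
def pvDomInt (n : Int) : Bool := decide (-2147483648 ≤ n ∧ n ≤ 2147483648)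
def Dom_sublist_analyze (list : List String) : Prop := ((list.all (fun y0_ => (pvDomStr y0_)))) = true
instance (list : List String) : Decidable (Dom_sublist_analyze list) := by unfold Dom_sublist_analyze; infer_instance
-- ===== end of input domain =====

-- B collects the space positions per string first and zips consecutive positions into segments,
-- replacing A's stateful scan with a running 'prev' index (alternative decomposition, same cost).

-- ===== PORT A =====
-- A: for idx, string in enumerate(list): text = list[idx]; prev = 0;
--    for detected, val in enumerate(text): if text[detected] == ' ': append text[prev:detected]; prev = detected
def sublist_analyze (list : List String) : List String :=
  ((PySem.List.enumerate list 0).foldl (fun newlist p =>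
    let text := PySem.List.pyGetD list p.1 ""   -- list[idx]; idx always in range
    ((PySem.List.enumerate text.toList 0).foldl (fun st q =>
      if PySem.List.pyGet? text.toList q.1 = some ' ' then   -- text[detected] == ' '
        (st.1 ++ [String.ofList (PySem.List.slice text.toList (some st.2) (some q.1))], q.1)
      else st) (newlist, (0 : Int))).1) [])

-- ===== PORT B =====
def sublist_analyze_alt (list : List String) : List String :=
  list.foldl (fun newlist text =>
    let cs := text.toList
    let positions := ((PySem.List.enumerate cs 0).filter (fun p => p.2 == ' ')).map (·.1)
    let starts := (0 : Int) :: PySem.List.slice positions none (some (-1))   -- [0] + positions[:-1]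
    newlist ++ (starts.zip positions).map (fun se =>
      String.ofList (PySem.List.slice cs (some se.1) (some se.2)))) []

-- ===== PRECONDITION & SPEC =====
def Spec_sublist_analyze (list : List String) (out : List String) : Prop := out = sublist_analyze_alt list
instance (list : List String) (out : List String) : Decidable (Spec_sublist_analyze list out) := by unfold Spec_sublist_analyze; infer_instance

-- ===== CLAIM (what is proved, stated in full; the proofs are below) =====
def Claim_equal_sublist_analyze : Prop := ∀ (list : List String), Dom_sublist_analyze list → Spec_sublist_analyze list (sublist_analyze list)

-- ===== LEMMAS AND PROOFS =====

def pvSeg (cs : List Char) (s e : Int) : String :=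
  String.ofList (PySem.List.slice cs (some s) (some e))

theorem pvSegLoop (cs : List Char) (L : List (Int × Char)) (nl : List String) (prev : Int) :
    L.foldl (fun st q =>
      if q.2 = ' ' then (st.1 ++ [pvSeg cs st.2 q.1], q.1) else st) (nl, prev)
    = (nl ++ (((prev :: ((L.filter (fun q => q.2 == ' ')).map (·.1)).dropLast).zip
          ((L.filter (fun q => q.2 == ' ')).map (·.1))).map (fun se => pvSeg cs se.1 se.2)),
       ((L.filter (fun q => q.2 == ' ')).map (·.1)).getLastD prev) := by
  induction L generalizing nl prev with
  | nil => simp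
  | cons q t ih =>
    by_cases hq : q.2 = ' '
    · simp only [List.foldl_cons, List.filter_cons, hq]
      rw [ih]
      simp only [beq_self_eq_true, if_true, List.map_cons, List.getLastD_cons]
      refine Prod.ext ?_ rfl
      cases h : (t.filter (fun q => q.2 == ' ')).map (·.1) with
      | nil => simp
      | cons a rest => simp [List.zip_cons_cons]
    · simp only [List.foldl_cons, if_neg hq, List.filter_cons]
      rw [ih]
      simp [hq]

theorem pvFoldlEnum {α β : Type} (g : β → α → β) (xs : List α) (s : Int) (init : β) :
    (PySem.List.enumerate xs s).foldl (fun acc p => g acc p.2) init = xs.foldl g init := by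
  induction xs generalizing s init with
  | nil => simp [PySem.List.enumerate_nil]
  | cons x t ih => simp [PySem.List.enumerate_cons, ih]

theorem pvInner (text : String) (nl : List String) :
    ((PySem.List.enumerate text.toList 0).foldl (fun st q =>
      if PySem.List.pyGet? text.toList q.1 = some ' ' then
        (st.1 ++ [String.ofList (PySem.List.slice text.toList (some st.2) (some q.1))], q.1)
      else st) (nl, (0 : Int))).1
    = nl ++ ((((0 : Int) ::
          (((PySem.List.enumerate text.toList 0).filter (fun p => p.2 == ' ')).map (·.1)).dropLast).zip
          (((PySem.List.enumerate text.toList 0).filter (fun p => p.2 == ' ')).map (·.1))).map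
          (fun se => pvSeg text.toList se.1 se.2)) := by
  rw [PySem.List.foldl_congr_mem
    (PySem.List.enumerate text.toList 0)
    (fun st q => if PySem.List.pyGet? text.toList q.1 = some ' ' then
        (st.1 ++ [String.ofList (PySem.List.slice text.toList (some st.2) (some q.1))], q.1)
      else st)
    (fun st q => if q.2 = ' ' then (st.1 ++ [pvSeg text.toList st.2 q.1], q.1) else st)
    (nl, (0 : Int))
    (by
      intro acc q hq
      rcases (PySem.List.mem_enumerate_iff _ _ _).1 hq with ⟨k, hk, rfl⟩
      simp [pvSeg, List.getElem?_eq_getElem hk])]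
  rw [pvSegLoop]

def pvBody (newlist : List String) (text : String) : List String :=
  ((PySem.List.enumerate text.toList 0).foldl (fun st q =>
    if PySem.List.pyGet? text.toList q.1 = some ' ' then
      (st.1 ++ [String.ofList (PySem.List.slice text.toList (some st.2) (some q.1))], q.1)
    else st) (newlist, (0 : Int))).1

theorem pvEq (list : List String) : sublist_analyze list = sublist_analyze_alt list := by
  unfold sublist_analyze sublist_analyze_alt
  rw [PySem.List.foldl_congr_mem
    (PySem.List.enumerate list 0)
    (fun newlist p =>
      let text := PySem.List.pyGetD list p.1 ""
      ((PySem.List.enumerate text.toList 0).foldl (fun st q =>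
        if PySem.List.pyGet? text.toList q.1 = some ' ' then
          (st.1 ++ [String.ofList (PySem.List.slice text.toList (some st.2) (some q.1))], q.1)
        else st) (newlist, (0 : Int))).1)
    (fun newlist p => pvBody newlist p.2)
    []
    (by
      intro acc p hp
      rcases (PySem.List.mem_enumerate_iff _ _ _).1 hp with ⟨k, hk, rfl⟩
      simp [pvBody, hk])]
  rw [pvFoldlEnum (g := pvBody)]
  refine PySem.List.foldl_congr_mem _ _ _ _ ?_
  intro acc text _
  rw [show pvBody acc text = _ from pvInner text acc]
  simp [pvSeg, PySem.List.slice_to_neg_one]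

-- ===== VERDICT (by name: the statement is the Claim_ definition above) =====
theorem sublist_analyze_spec : Claim_equal_sublist_analyze := by
  intro list _
  unfold Spec_sublist_analyze
  exact pvEq list
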